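-- pv_equiv track=rewrite | github.com/ebehlmann/advent_of_python | 2017/day_6/day_6.py | redistribute_blocks
-- ===== SOURCE A (Python) =====
-- def find_first_max_bank(bank_config):
-- 	max_index = 0
-- 	max_bank = 0
-- 	i = 0
-- 	while(i<len(bank_config)):
-- 		if bank_config[i] > max_bank:
-- 			max_index = i
-- 			max_bank = bank_config[i]
-- 		i += 1
-- 	return max_index
--
-- def redistribute_blocks(starting_config):
-- 	past_configs = []
--
-- 	current_config = starting_config
-- 	past_configs.append(list(current_config))
--
-- 	redistributions = 0
--
-- 	while(True):
-- 		max_bank = find_first_max_bank(current_config)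
-- 		blocks_to_redistribute = current_config[max_bank]
-- 		current_config[max_bank] = 0
--
-- 		if(max_bank == len(current_config) - 1):
-- 			position = 0
-- 		else:
-- 			position = max_bank + 1
--
-- 		while blocks_to_redistribute > 0:
-- 			current_config[position] += 1
-- 			if(position == len(current_config) - 1):
-- 				position = 0
-- 			else:
-- 				position = position + 1
--
-- 			blocks_to_redistribute -= 1
--
-- 		redistributions += 1
--
-- 		if(current_config in past_configs):
-- 			break
-- 		else:
-- 			past_configs.append(list(current_config))
--
-- 	return redistributions
-- ===== SOURCE B (Python) =====
-- def redistribute_blocks(starting_config):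
--     config = starting_config
--     n = len(config)
--     seen = {tuple(config)}
--     redistributions = 0
--     while True:
--         blocks = max(config)
--         i = config.index(blocks)
--         config[i] = 0
--         base, extra = divmod(blocks, n)
--         for j in range(n):
--             config[j] += base
--         for k in range(i + 1, i + 1 + extra):
--             config[k % n] += 1
--         redistributions += 1
--         t = tuple(config)
--         if t in seen:
--             return redistributions
--         seen.add(t)
-- ===== Notes on version B (the rewrite author's own statement) =====
-- stated objective: alternative
-- what changed: B replaces A's one-block-at-a-time inner redistribution loop with a divmod closed form (add blocks//n to every bank and +1 to the blocks%n banks after the max), finds the first max bank via max()/index() instead of a hand-rolled running-max scan, and keeps seen configurations in a set of tuples instead of scanning a list of lists; …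
-- outside the precondition, e.g. on redistribute_blocks([-1]): A returns 2, B returns 1; on redistribute_blocks([]): A raises IndexError, B raises ValueError
import Mathlib
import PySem

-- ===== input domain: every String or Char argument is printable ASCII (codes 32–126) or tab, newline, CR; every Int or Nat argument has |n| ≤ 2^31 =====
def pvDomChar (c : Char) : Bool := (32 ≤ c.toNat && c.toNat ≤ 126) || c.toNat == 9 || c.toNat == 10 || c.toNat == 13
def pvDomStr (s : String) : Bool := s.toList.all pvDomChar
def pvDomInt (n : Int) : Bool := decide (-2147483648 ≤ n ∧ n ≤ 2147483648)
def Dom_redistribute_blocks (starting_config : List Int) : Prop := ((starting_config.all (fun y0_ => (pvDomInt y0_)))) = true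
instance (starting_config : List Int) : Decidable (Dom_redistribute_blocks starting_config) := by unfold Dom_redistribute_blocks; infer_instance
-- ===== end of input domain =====

-- B replaces A's one-block-at-a-time redistribution loop with a divmod closed form and the
-- list scan of past configurations with a set of tuples (objective: alternative algorithm). Both A and B
-- mutate starting_config in place in Python; the equivalence proved here is about the return value.
-- Both loop ports carry a fuel argument purely for totality (Python's `while True` loop;
-- the fuel bound exceeds the number of distinct reachable configurations, a pigeonhole
-- bound on the iterations of both loops, so it is never exhausted on Pre_).
def pvFuel (starting_config : List Int) : Nat :=
  (2 * (starting_config.map Int.natAbs).sum + 1) ^ starting_config.length + 2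

-- ===== PORT A =====
-- while(i<len(bank_config)) loop of find_first_max_bank; i only ever counts 0,1,…  so a Nat
-- index with in-range access is exact.
def ffmb_loop (bank_config : List Int) (i : Nat) (max_index max_bank : Int) : Int :=
  if h : i < bank_config.length then
    if bank_config[i] > max_bank then ffmb_loop bank_config (i + 1) (i : Int) bank_config[i]
    else ffmb_loop bank_config (i + 1) max_index max_bank
  else max_index
termination_by bank_config.length - i

def find_first_max_bank (bank_config : List Int) : Int := ffmb_loop bank_config 0 0 0

-- inner `while blocks_to_redistribute > 0` loop; position stays in [0, len) so the
-- .toNat list update is exact (Python current_config[position] += 1).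
def distribute_loop (c : List Int) (position : Int) (blocks : Int) : List Int :=
  if blocks > 0 then
    distribute_loop (c.set position.toNat (PySem.List.pyGetD c position 0 + 1))
      (if position = (c.length : Int) - 1 then 0 else position + 1) (blocks - 1)
  else c
termination_by blocks.toNat
decreasing_by omega

-- the outer while(True) loop; max_bank is a valid index on Pre_ so the .toNat update is exact
def redistribute_loop (fuel : Nat) (past_configs : List (List Int)) (c : List Int)
    (redistributions : Int) : Int :=
  match fuel with
  | 0 => redistributions
  | fuel + 1 =>
    let max_bank := find_first_max_bank c
    let blocks := PySem.List.pyGetD c max_bank 0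
    let c1 := c.set max_bank.toNat 0
    let position : Int := if max_bank = (c1.length : Int) - 1 then 0 else max_bank + 1
    let c2 := distribute_loop c1 position blocks
    let redistributions' := redistributions + 1
    if c2 ∈ past_configs then redistributions'
    else redistribute_loop fuel (past_configs ++ [c2]) c2 redistributions'

def redistribute_blocks (starting_config : List Int) : Int :=
  redistribute_loop (pvFuel starting_config) [starting_config] starting_config 0

-- ===== PORT B =====
-- transliteration of Source B: first max bank via max()/index(), divmod closed-form redistribution
-- (two index for-loops), a set of seen configurations.
def redistribute_alt_loop (fuel : Nat) (seen : PySem.Set (List Int)) (c : List Int)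
    (redistributions : Int) : Int :=
  match fuel with
  | 0 => redistributions
  | fuel + 1 =>
    let n : Int := (c.length : Int)
    let blocks := (PySem.List.max? c (fun x => x)).getD 0   -- max(config); c ≠ [] on Pre_
    let i : Int := ((PySem.List.index? c blocks).getD 0 : Nat)
    let c1 := c.set i.toNat 0
    let base := PySem.Int.floordiv blocks n
    let extra := PySem.Int.mod blocks n
    let c2 := (PySem.List.pyRange 0 n 1).foldl
      (fun acc j => acc.set j.toNat (PySem.List.pyGetD acc j 0 + base)) c1
    let c3 := (PySem.List.pyRange (i + 1) (i + 1 + extra) 1).foldl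
      (fun acc k =>
        let idx := PySem.Int.mod k n
        acc.set idx.toNat (PySem.List.pyGetD acc idx 0 + 1)) c2
    let redistributions' := redistributions + 1
    if c3 ∈ seen then redistributions'
    else redistribute_alt_loop fuel (PySem.Set.add seen c3) c3 redistributions'

def redistribute_blocks_alt (starting_config : List Int) : Int :=
  redistribute_alt_loop (pvFuel starting_config) (PySem.Set.ofList [starting_config])
    starting_config 0

-- ===== PRECONDITION & SPEC =====
-- Pre_ admits the puzzle's natural inputs: a nonempty configuration that is all-nonnegative
-- or holds a positive total number of blocks. Excluded are the empty list, on which A raises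
-- IndexError (B ValueError), and configurations with a negative bank and nonpositive total,
-- which lie outside the task's input space of memory-block counts.
def Pre_redistribute_blocks (starting_config : List Int) : Prop :=
  starting_config ≠ [] ∧ ((∀ x ∈ starting_config, 0 ≤ x) ∨ 0 < starting_config.sum)
instance (starting_config : List Int) : Decidable (Pre_redistribute_blocks starting_config) := by
  unfold Pre_redistribute_blocks; infer_instance

def pvWitness_redistribute_blocks : List Int := [0, 2, 7, 0]

def Spec_redistribute_blocks (starting_config : List Int) (out : Int) : Prop := out = redistribute_blocks_alt starting_config
instance (starting_config : List Int) (out : Int) : Decidable (Spec_redistribute_blocks starting_config out) := by unfold Spec_redistribute_blocks; infer_instance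

-- ===== CLAIM (what is proved, stated in full; the proofs are below) =====
def Claim_equal_redistribute_blocks : Prop := ∀ (starting_config : List Int), Dom_redistribute_blocks starting_config → Pre_redistribute_blocks starting_config → Spec_redistribute_blocks starting_config (redistribute_blocks starting_config)


-- ===== LEMMAS AND PROOFS =====

def ffF : List Int → Int → Int → Int → Int
  | [], _, mi, _ => mi
  | v :: t, s, mi, mb => if v > mb then ffF t (s + 1) s v else ffF t (s + 1) mi mb

lemma ffmb_eq_ffF (k : Nat) : ∀ (xl : List Int) (i : Nat) (mi mb : Int), i + k = xl.length →
    ffmb_loop xl i mi mb = ffF (xl.drop i) (i : Int) mi mb := by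
  induction k with
  | zero =>
    intro xl i mi mb h
    rw [ffmb_loop, dif_neg (by omega), List.drop_of_length_le (by omega), ffF]
  | succ k ih =>
    intro xl i mi mb h
    have hi : i < xl.length := by omega
    rw [ffmb_loop, dif_pos hi, List.drop_eq_getElem_cons hi, ffF]
    split
    · rw [ih xl (i+1) _ _ (by omega)]; norm_cast
    · rw [ih xl (i+1) mi mb (by omega)]; norm_cast

lemma foldl_max_comm (l : List Int) : ∀ a b : Int,
    List.foldl max (max a b) l = max a (List.foldl max b l) := by
  induction l with
  | nil => intro a b; rfl
  | cons x t ih => intro a b; simp only [List.foldl_cons, max_assoc, ih]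

lemma ffF_spec (l : List Int) : ∀ s mi mb : Int,
    ffF l s mi mb =
      if List.foldl max mb l = mb then mi
      else s + ((l.idxOf (List.foldl max mb l) : Nat) : Int) := by
  induction l with
  | nil => intro s mi mb; simp [ffF]
  | cons v t ih =>
    intro s mi mb
    have hle := PySem.List.le_foldl_max t v
    rw [ffF]
    by_cases hv : v > mb
    · rw [if_pos hv, ih]
      have hmax : max mb v = v := max_eq_right (le_of_lt hv)
      rw [List.foldl_cons, hmax]
      set M := List.foldl max v t with hM
      by_cases hMv : M = v
      · rw [if_pos hMv, hMv, if_neg (by omega)]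
        rw [List.idxOf_cons_self]
        push_cast; ring
      · have hMgt : v < M := lt_of_le_of_ne hle.1 (fun h => hMv h.symm)
        rw [if_neg hMv, if_neg (by omega), List.idxOf_cons_ne _ (by omega)]
        push_cast; ring
    · rw [if_neg hv, ih]
      have hmax : max mb v = mb := max_eq_left (by omega)
      rw [List.foldl_cons, hmax]
      set M := List.foldl max mb t with hM
      have hMmb : mb ≤ M := (PySem.List.le_foldl_max t mb).1
      by_cases hMb : M = mb
      · rw [if_pos hMb, if_pos hMb]
      · rw [if_neg hMb, if_neg hMb, List.idxOf_cons_ne _ (by omega)]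
        push_cast; ring

lemma idxOf?_of_mem (l : List Int) (v : Int) (h : v ∈ l) : l.idxOf? v = some (l.idxOf v) := by
  have h2 : (l.idxOf? v).isSome := by rwa [List.isSome_idxOf?]
  rw [List.idxOf_eq_getD_idxOf?]
  cases hx : l.idxOf? v with
  | none => rw [hx] at h2; simp at h2
  | some k => simp

lemma sum_nonpos_list (l : List Int) (h : ∀ x ∈ l, x ≤ 0) : l.sum ≤ 0 := by
  induction l with
  | nil => simp
  | cons x t ih =>
    simp only [List.sum_cons]
    have h1 := h x (List.mem_cons_self)
    have h2 := ih (fun y hy => h y (List.mem_cons_of_mem _ hy))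
    omega

lemma max_pos_of_sum_pos (xl : List Int) (h : 0 < xl.sum) :
    0 < (PySem.List.max? xl (fun x => x)).getD 0 := by
  have hc : xl ≠ [] := by intro h0; rw [h0] at h; simp at h
  obtain ⟨y, hy, hy0⟩ : ∃ y ∈ xl, 0 < y := by
    by_contra h'
    push Not at h'
    have := sum_nonpos_list xl h'
    omega
  cases hx : PySem.List.max? xl (fun x => x) with
  | none => rw [PySem.List.max?_eq_none_iff] at hx; exact absurd hx hc
  | some v =>
    rw [Option.getD_some]
    have := PySem.List.max?_isMax hx y hy
    omega

lemma m_nonneg (xl : List Int) (hc : xl ≠ [])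
    (hP : (∀ x ∈ xl, 0 ≤ x) ∨ 0 < xl.sum) :
    0 ≤ (PySem.List.max? xl (fun x => x)).getD 0 := by
  cases hP with
  | inl hnn =>
    cases hx : PySem.List.max? xl (fun x => x) with
    | none => rw [PySem.List.max?_eq_none_iff] at hx; exact absurd hx hc
    | some v => rw [Option.getD_some]; exact hnn v (PySem.List.max?_mem hx)
  | inr hsum => exact le_of_lt (max_pos_of_sum_pos xl hsum)

-- on Pre_ configs A's running-max scan picks the first occurrence of the maximum,
-- exactly what B's config.index(max(config)) picks
lemma find_first_eq (xl : List Int) (hc : xl ≠ [])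
    (hP : (∀ x ∈ xl, 0 ≤ x) ∨ 0 < xl.sum) :
    find_first_max_bank xl =
      ((((PySem.List.index? xl ((PySem.List.max? xl (fun x => x)).getD 0)).getD 0 : Nat)) : Int) := by
  obtain ⟨x, t, rfl⟩ := List.exists_cons_of_ne_nil hc
  rw [find_first_max_bank, ffmb_eq_ffF (x :: t).length _ 0 _ _ (by simp), List.drop_zero,
    ffF_spec, PySem.List.max?_id_cons, Option.getD_some]
  set m := List.foldl max x t with hm
  have hxm : x ≤ m ∧ ∀ y ∈ t, y ≤ m := PySem.List.le_foldl_max t x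
  have hmnn : 0 ≤ m := by
    have := m_nonneg (x :: t) hc hP
    rwa [PySem.List.max?_id_cons, Option.getD_some] at this
  have hM0 : List.foldl max 0 (x :: t) = m := by
    rw [List.foldl_cons, hm, foldl_max_comm t 0 x]; omega
  have hmem : m ∈ (x :: t) := PySem.List.max?_mem (by rw [PySem.List.max?_id_cons])
  rw [hM0, PySem.List.index?_eq_idxOf?, idxOf?_of_mem _ _ hmem, Option.getD_some]
  by_cases hm0 : m = 0
  · have hx00 : x = 0 := by
      cases hP with
      | inl hnn => have := hnn x (List.mem_cons_self); omega
      | inr hsum =>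
        have := max_pos_of_sum_pos (x :: t) hsum
        rw [PySem.List.max?_id_cons, Option.getD_some] at this
        omega
    rw [if_pos hm0, hm0, ← hx00, List.idxOf_cons_self]
    norm_cast
  · rw [if_neg hm0]
    push_cast; ring

lemma find_first_range (xl : List Int) (hc : xl ≠ [])
    (hP : (∀ x ∈ xl, 0 ≤ x) ∨ 0 < xl.sum) :
    0 ≤ find_first_max_bank xl ∧ find_first_max_bank xl < (xl.length : Int) := by
  rw [find_first_eq xl hc hP]
  have hmem : ((PySem.List.max? xl (fun x => x)).getD 0) ∈ xl := by
    cases hx : PySem.List.max? xl (fun x => x) with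
    | none => rw [PySem.List.max?_eq_none_iff] at hx; exact absurd hx hc
    | some v => rw [Option.getD_some]; exact PySem.List.max?_mem hx
  constructor
  · positivity
  · rw [PySem.List.index?_eq_idxOf?, idxOf?_of_mem _ _ hmem, Option.getD_some]
    exact_mod_cast List.idxOf_lt_length_of_mem hmem

-- and A's blocks_to_redistribute = the maximum value itself
lemma blocks_eq (xl : List Int) (hc : xl ≠ [])
    (hP : (∀ x ∈ xl, 0 ≤ x) ∨ 0 < xl.sum) :
    PySem.List.pyGetD xl (find_first_max_bank xl) 0
      = (PySem.List.max? xl (fun x => x)).getD 0 := by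
  have hmem : ((PySem.List.max? xl (fun x => x)).getD 0) ∈ xl := by
    cases hx : PySem.List.max? xl (fun x => x) with
    | none => rw [PySem.List.max?_eq_none_iff] at hx; exact absurd hx hc
    | some v => rw [Option.getD_some]; exact PySem.List.max?_mem hx
  rw [find_first_eq xl hc hP, PySem.List.index?_eq_idxOf?, idxOf?_of_mem _ _ hmem,
    Option.getD_some, PySem.List.pyGetD_natCast,
    List.getD_eq_getElem xl 0 (List.idxOf_lt_length_of_mem hmem)]
  exact List.getElem_idxOf (List.idxOf_lt_length_of_mem hmem)

def cntF (b pos : Int) (j : Nat) (n : Int) : Int :=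
  PySem.Int.floordiv b n +
    (if PySem.Int.mod ((j : Int) - pos) n < PySem.Int.mod b n then 1 else 0)

lemma mod_small (x n : Int) (hn : 0 < n) (h0 : -n ≤ x) (h1 : x < n) :
    PySem.Int.mod x n = if 0 ≤ x then x else x + n := by
  rw [PySem.Int.mod_eq_emod_of_pos hn]
  split
  · next h => exact Int.emod_eq_of_lt h h1
  · next h =>
    conv_lhs => rw [show x = (x + n) - n by ring]
    rw [Int.sub_emod_right]
    exact Int.emod_eq_of_lt (show (0:Int) ≤ x + n by omega) (show x + n < n by omega)

lemma mod_small2 (x n : Int) (hn : 0 < n) (h0 : 0 ≤ x) (h1 : x < 2 * n) :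
    PySem.Int.mod x n = if x < n then x else x - n := by
  by_cases h : x < n
  · rw [mod_small x n hn (by omega) h, if_pos (by omega), if_pos h]
  · rw [if_neg h, PySem.Int.mod_eq_emod_of_pos hn]
    conv_lhs => rw [show x = (x - n) + n * 1 by ring]
    rw [Int.add_mul_emod_self_left]
    exact Int.emod_eq_of_lt (by omega) (by omega)

lemma div_pred (b n : Int) (hn : 0 < n) :
    (PySem.Int.mod b n = 0 →
      PySem.Int.floordiv (b - 1) n = PySem.Int.floordiv b n - 1 ∧
      PySem.Int.mod (b - 1) n = n - 1) ∧
    (PySem.Int.mod b n ≠ 0 →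
      PySem.Int.floordiv (b - 1) n = PySem.Int.floordiv b n ∧
      PySem.Int.mod (b - 1) n = PySem.Int.mod b n - 1) := by
  have hid := PySem.Int.floordiv_mul_add_mod b n
  have hs0 := PySem.Int.mod_nonneg b hn
  have hs1 := PySem.Int.mod_lt b hn
  rw [PySem.Int.floordiv_eq_ediv_of_pos hn, PySem.Int.mod_eq_emod_of_pos hn] at *
  rw [PySem.Int.floordiv_eq_ediv_of_pos hn, PySem.Int.mod_eq_emod_of_pos hn]
  constructor
  · intro h
    have := (Int.ediv_emod_unique hn (a := b - 1) (q := b / n - 1) (r := n - 1)).mpr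
      ⟨by linear_combination hid - h, by omega, by omega⟩
    exact ⟨this.1, this.2⟩
  · intro h
    have := (Int.ediv_emod_unique hn (a := b - 1) (q := b / n) (r := b % n - 1)).mpr
      ⟨by linear_combination hid, by omega, by omega⟩
    exact ⟨this.1, this.2⟩

lemma cnt_step (n b pos : Int) (j : Nat) (hn : 0 < n) (hp : 0 ≤ pos) (hp2 : pos < n)
    (hj : (j : Int) < n) (_hb : 1 ≤ b) :
    cntF b pos j n =
      (if (j : Int) = pos then 1 else 0) +
        cntF (b - 1) (if pos = n - 1 then 0 else pos + 1) j n := by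
  unfold cntF
  have hd : PySem.Int.mod ((j : Int) - pos) n =
      if pos ≤ (j : Int) then (j : Int) - pos else (j : Int) - pos + n := by
    rw [mod_small _ n hn (by omega) (by omega)]
    split <;> split <;> omega
  have hdp := div_pred b n hn
  have hs0 := PySem.Int.mod_nonneg b hn
  have hs1 := PySem.Int.mod_lt b hn
  by_cases hpe : pos = n - 1
  · rw [if_pos hpe]
    have hd' : PySem.Int.mod ((j : Int) - 0) n = (j : Int) := by
      rw [mod_small _ n hn (by omega) (by omega)]; rw [if_pos (by omega)]; ring
    rw [hd', hd]
    by_cases hs : PySem.Int.mod b n = 0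
    · obtain ⟨hq', hs'⟩ := hdp.1 hs
      rw [hq', hs', hs]
      split_ifs <;> omega
    · obtain ⟨hq', hs'⟩ := hdp.2 hs
      rw [hq', hs']
      split_ifs <;> omega
  · rw [if_neg hpe]
    have hd' : PySem.Int.mod ((j : Int) - (pos + 1)) n =
        if pos + 1 ≤ (j : Int) then (j : Int) - pos - 1 else (j : Int) - pos - 1 + n := by
      rw [mod_small _ n hn (by omega) (by omega)]
      split <;> split <;> omega
    rw [hd', hd]
    by_cases hs : PySem.Int.mod b n = 0
    · obtain ⟨hq', hs'⟩ := hdp.1 hs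
      rw [hq', hs', hs]
      split_ifs <;> omega
    · obtain ⟨hq', hs'⟩ := hdp.2 hs
      rw [hq', hs']
      split_ifs <;> omega

lemma cnt_closed (n b i : Int) (j : Nat) (hn : 0 < n) (hi : 0 ≤ i) (hi2 : i < n)
    (hj : (j : Int) < n) (_hb : 0 ≤ b) :
    cntF b (if i = n - 1 then 0 else i + 1) j n =
      PySem.Int.floordiv b n +
        (if (1 ≤ PySem.Int.mod ((j : Int) - i) n ∧
             PySem.Int.mod ((j : Int) - i) n ≤ PySem.Int.mod b n)
         then 1 else 0) := by
  unfold cntF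
  have hs0 := PySem.Int.mod_nonneg b hn
  have hs1 := PySem.Int.mod_lt b hn
  have hdi : PySem.Int.mod ((j : Int) - i) n =
      if i ≤ (j : Int) then (j : Int) - i else (j : Int) - i + n := by
    rw [mod_small _ n hn (by omega) (by omega)]
    split <;> split <;> omega
  by_cases hpe : i = n - 1
  · rw [if_pos hpe]
    have hd' : PySem.Int.mod ((j : Int) - 0) n = (j : Int) := by
      rw [mod_small _ n hn (by omega) (by omega), if_pos (by omega)]; ring
    rw [hd', hdi]
    split_ifs <;> omega
  · rw [if_neg hpe]
    have hd' : PySem.Int.mod ((j : Int) - (i + 1)) n =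
        if i + 1 ≤ (j : Int) then (j : Int) - i - 1 else (j : Int) - i - 1 + n := by
      rw [mod_small _ n hn (by omega) (by omega)]
      split <;> split <;> omega
    rw [hd', hdi]
    split_ifs <;> omega

lemma distribute_spec (bn : Nat) : ∀ (b pos : Int) (xl : List Int), b.toNat = bn → 0 ≤ b →
    0 ≤ pos → pos < (xl.length : Int) →
    distribute_loop xl pos b = xl.mapIdx (fun j x => x + cntF b pos j (xl.length : Int)) := by
  induction bn with
  | zero =>
    intro b pos xl hbn hb hp hp2
    have hb0 : b = 0 := by omega
    subst hb0
    have hn : (0:Int) < (xl.length : Int) := by omega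
    rw [distribute_loop, if_neg (by omega)]
    apply List.ext_getElem (by simp)
    intro j hj hj2
    rw [List.getElem_mapIdx]
    have hm0 : PySem.Int.mod 0 (xl.length : Int) = 0 := by
      rw [PySem.Int.mod_eq_emod_of_pos hn]; exact Int.zero_emod _
    have hf0 : PySem.Int.floordiv 0 (xl.length : Int) = 0 := by
      rw [PySem.Int.floordiv_eq_ediv_of_pos hn]; exact Int.zero_ediv _
    have hcnt : cntF 0 pos j (xl.length : Int) = 0 := by
      unfold cntF
      rw [hf0, hm0, if_neg (by have := PySem.Int.mod_nonneg ((j:Int) - pos) hn; omega)]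
      ring
    rw [hcnt, add_zero]
  | succ k ih =>
    intro b pos xl hbn hb hp hp2
    have hbpos : (0:Int) < b := by omega
    have hn : (0:Int) < (xl.length : Int) := by omega
    rw [distribute_loop, if_pos hbpos]
    have hptn : (pos.toNat : Int) = pos := Int.toNat_of_nonneg hp
    set xl' := xl.set pos.toNat (PySem.List.pyGetD xl pos 0 + 1) with hc'
    have hlen' : xl'.length = xl.length := by simp [hc']
    rw [ih (b - 1) _ xl' (by omega) (by omega)
      (by split <;> omega) (by rw [hlen']; split <;> omega)]
    apply List.ext_getElem (by simp [hlen'])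
    intro j hj hj2
    have hjc : j < xl.length := by simp at hj2; omega
    have hstep := cnt_step (xl.length : Int) b pos j hn hp hp2 (by exact_mod_cast hjc) (by omega)
    simp only [List.length_set, List.getElem_mapIdx, hc', List.getElem_set]
    rw [hstep]
    have hget : PySem.List.pyGetD xl pos 0 = xl[pos.toNat]'(by omega) :=
      PySem.List.pyGetD_eq_getElem xl 0 hp hp2
    by_cases hjp : pos.toNat = j
    · subst hjp
      rw [if_pos rfl, if_pos (show ((pos.toNat : Nat) : Int) = pos by omega), hget]
      ring
    · rw [if_neg hjp, if_neg (show ¬ ((j : Nat) : Int) = pos by omega)]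
      ring

lemma fold1_spec (k : Nat) : ∀ (a : Nat) (xl : List Int) (base n : Int), n = (xl.length : Int) →
    a + k = xl.length →
    (PySem.List.pyRange (a : Int) n 1).foldl
        (fun acc j => acc.set j.toNat (PySem.List.pyGetD acc j 0 + base)) xl
      = xl.mapIdx (fun j x => if a ≤ j then x + base else x) := by
  induction k with
  | zero =>
    intro a xl base n hn ha
    rw [hn, PySem.List.pyRange_one_eq_nil (by omega), List.foldl_nil]
    apply List.ext_getElem (by simp)
    intro j hj hj2
    rw [List.getElem_mapIdx, if_neg (by omega)]
  | succ k ih =>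
    intro a xl base n hn ha
    subst hn
    have hlt : (a : Int) < (xl.length : Int) := by omega
    rw [PySem.List.pyRange_one_cons (by omega), List.foldl_cons]
    have htn : ((a : Int)).toNat = a := by omega
    rw [htn]
    have hget : PySem.List.pyGetD xl (a : Int) 0 = xl.getD a 0 := PySem.List.pyGetD_natCast xl a 0
    set xl' := xl.set a (PySem.List.pyGetD xl (a : Int) 0 + base) with hc'
    have hlen' : xl'.length = xl.length := by simp [hc']
    have hcast : ((a : Int) + 1) = ((a + 1 : Nat) : Int) := by push_cast; ring
    rw [hcast, ih (a + 1) xl' base (xl.length : Int) (by rw [hlen']) (by omega)]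
    apply List.ext_getElem (by simp [hlen'])
    intro j hj hj2
    have hjc : j < xl.length := by simp at hj2; omega
    simp only [List.getElem_mapIdx, hc', List.getElem_set]
    have hgv : xl.getD a 0 = xl[a]'(by omega) := List.getD_eq_getElem xl 0 (by omega)
    by_cases hja : a = j
    · subst hja
      rw [if_neg (by omega), if_pos rfl, if_pos (le_refl a), hget, hgv]
    · by_cases hle : a + 1 ≤ j
      · rw [if_pos hle, if_neg hja, if_pos (by omega)]
      · rw [if_neg hle, if_neg hja, if_neg (by omega)]

lemma fold2_spec (k : Nat) : ∀ (a r i n : Int) (xl : List Int), n = (xl.length : Int) →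
    0 ≤ i → i < n → i + 1 ≤ a → a + k = i + 1 + r → r < n →
    (PySem.List.pyRange a (i + 1 + r) 1).foldl
        (fun acc kk =>
          let idx := PySem.Int.mod kk n
          acc.set idx.toNat (PySem.List.pyGetD acc idx 0 + 1)) xl
      = xl.mapIdx (fun j x =>
          x + if (a - i ≤ PySem.Int.mod ((j : Int) - i) n ∧ PySem.Int.mod ((j : Int) - i) n ≤ r)
              then 1 else 0) := by
  induction k with
  | zero =>
    intro a r i n xl hn hi hi2 ha hk hr
    rw [PySem.List.pyRange_one_eq_nil (by omega), List.foldl_nil]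
    apply List.ext_getElem (by simp)
    intro j hj hj2
    rw [List.getElem_mapIdx, if_neg (by omega), add_zero]
  | succ k ih =>
    intro a r i n xl hn hi hi2 ha hk hr
    have hnpos : (0:Int) < n := by omega
    rw [PySem.List.pyRange_one_cons (by omega), List.foldl_cons]
    have hidx : PySem.Int.mod a n = if a < n then a else a - n := by
      rw [mod_small2 _ n hnpos (by omega) (by omega)]
    have hidx0 : 0 ≤ PySem.Int.mod a n := PySem.Int.mod_nonneg _ hnpos
    have hidx1 : PySem.Int.mod a n < n := PySem.Int.mod_lt _ hnpos
    set xl' := xl.set (PySem.Int.mod a n).toNat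
      (PySem.List.pyGetD xl (PySem.Int.mod a n) 0 + 1) with hc'
    have hlen' : xl'.length = xl.length := by simp [hc']
    show (PySem.List.pyRange (a + 1) (i + 1 + r) 1).foldl _ xl' = _
    rw [ih (a + 1) r i n xl' (by rw [hn, hlen']) hi hi2 (by omega) (by omega) hr]
    apply List.ext_getElem (by simp [hlen'])
    intro j hj hj2
    have hjc : j < xl.length := by simp at hj2; omega
    have hjn : (j : Int) < n := by omega
    simp only [List.getElem_mapIdx, hc', List.getElem_set]
    have hdj : PySem.Int.mod ((j:Int) - i) n =
        if i ≤ (j:Int) then (j:Int) - i else (j:Int) - i + n := by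
      rw [mod_small _ n hnpos (by omega) (by omega)]
      split <;> split <;> omega
    have hget : PySem.List.pyGetD xl (PySem.Int.mod a n) 0
        = xl[(PySem.Int.mod a n).toNat]'(by omega) :=
      PySem.List.pyGetD_eq_getElem xl 0 hidx0 (by omega)
    by_cases hje : (PySem.Int.mod a n).toNat = j
    · rw [if_pos hje, hget]
      have hji : (j : Int) = PySem.Int.mod a n := by omega
      simp only [hje]
      rw [hidx] at hji
      rw [hdj]
      split_ifs <;> omega
    · rw [if_neg hje]
      have hne : (j : Int) ≠ PySem.Int.mod a n := by omega
      rw [hidx] at hne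
      rw [hdj]
      split_ifs <;> omega

-- A's whole redistribution step in closed form: zero the first max bank, add cntF to each bank
lemma stepA_eq (xl : List Int) (hc : xl ≠ [])
    (hP : (∀ x ∈ xl, 0 ≤ x) ∨ 0 < xl.sum) :
    distribute_loop (xl.set (find_first_max_bank xl).toNat 0)
        (if find_first_max_bank xl
            = (((xl.set (find_first_max_bank xl).toNat 0).length : Int) - 1)
         then 0 else find_first_max_bank xl + 1)
        (PySem.List.pyGetD xl (find_first_max_bank xl) 0)
      = (xl.set (find_first_max_bank xl).toNat 0).mapIdx
          (fun j x => x + cntF (PySem.List.pyGetD xl (find_first_max_bank xl) 0)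
            (if find_first_max_bank xl = ((xl.length : Int) - 1) then 0
             else find_first_max_bank xl + 1) j (xl.length : Int)) := by
  obtain ⟨hi0, hi1⟩ := find_first_range xl hc hP
  have hb0 : 0 ≤ PySem.List.pyGetD xl (find_first_max_bank xl) 0 := by
    rw [blocks_eq xl hc hP]
    exact m_nonneg xl hc hP
  have hlen1 : (xl.set (find_first_max_bank xl).toNat 0).length = xl.length := by simp
  rw [distribute_spec (PySem.List.pyGetD xl (find_first_max_bank xl) 0).toNat _ _ _ rfl hb0
    (by rw [hlen1]; split <;> omega) (by rw [hlen1]; split <;> omega), hlen1]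

-- B's step equals A's closed form elementwise (divmod quota = cntF)
lemma c2_eq (xl : List Int) (hc : xl ≠ [])
    (hP : (∀ x ∈ xl, 0 ≤ x) ∨ 0 < xl.sum) :
    (PySem.List.pyRange
        ((((PySem.List.index? xl ((PySem.List.max? xl (fun x => x)).getD 0)).getD 0 : Nat) : Int) + 1)
        ((((PySem.List.index? xl ((PySem.List.max? xl (fun x => x)).getD 0)).getD 0 : Nat) : Int) + 1
          + PySem.Int.mod ((PySem.List.max? xl (fun x => x)).getD 0) ((xl.length : Int))) 1).foldl
      (fun acc k =>
        let idx := PySem.Int.mod k ((xl.length : Int))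
        acc.set idx.toNat (PySem.List.pyGetD acc idx 0 + 1))
      ((PySem.List.pyRange 0 ((xl.length : Int)) 1).foldl
        (fun acc j => acc.set j.toNat (PySem.List.pyGetD acc j 0 +
          PySem.Int.floordiv ((PySem.List.max? xl (fun x => x)).getD 0) ((xl.length : Int))))
        (xl.set ((((PySem.List.index? xl ((PySem.List.max? xl (fun x => x)).getD 0)).getD 0 : Nat) : Int)).toNat 0))
      = distribute_loop (xl.set (find_first_max_bank xl).toNat 0)
          (if find_first_max_bank xl
              = (((xl.set (find_first_max_bank xl).toNat 0).length : Int) - 1)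
           then 0 else find_first_max_bank xl + 1)
          (PySem.List.pyGetD xl (find_first_max_bank xl) 0) := by
  have hff := find_first_eq xl hc hP
  have hbl := blocks_eq xl hc hP
  obtain ⟨hi0, hi1⟩ := find_first_range xl hc hP
  have hnpos : (0:Int) < (xl.length : Int) := by omega
  have hm0 : 0 ≤ (PySem.List.max? xl (fun x => x)).getD 0 := m_nonneg xl hc hP
  rw [stepA_eq xl hc hP, hbl, hff]
  rw [hff] at hi0 hi1
  set m := (PySem.List.max? xl (fun x => x)).getD 0 with hm
  set n : Int := (xl.length : Int) with hn
  set i : Int := ((((PySem.List.index? xl m).getD 0 : Nat)) : Int) with hi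
  set c1 := xl.set i.toNat 0 with hc1
  have hlenc : (c1.length : Int) = n := by simp [hc1, hn]
  set base := PySem.Int.floordiv m n with hbase
  set r := PySem.Int.mod m n with hr
  have hr0 : 0 ≤ r := PySem.Int.mod_nonneg _ hnpos
  have hr1 : r < n := PySem.Int.mod_lt _ hnpos
  -- base fold
  rw [show (PySem.List.pyRange 0 n 1) = (PySem.List.pyRange ((0:Nat) : Int) n 1) by norm_num]
  rw [fold1_spec c1.length 0 c1 base n (by rw [hlenc]) (by omega)]
  -- remainder fold
  rw [fold2_spec r.toNat (i + 1) r i n _ (by rw [List.length_mapIdx]; exact hlenc.symm) hi0 hi1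
    (by omega) (by omega) hr1]
  apply List.ext_getElem (by simp [hc1])
  intro j hj hj2
  have hjc : j < c1.length := by simp [hc1]; simp at hj2; omega
  have hjn : (j : Int) < n := by rw [← hlenc]; exact_mod_cast hjc
  simp only [List.getElem_mapIdx]
  rw [if_pos (Nat.zero_le j)]
  rw [cnt_closed n m i j hnpos hi0 hi1 hjn hm0, ← hbase, ← hr]
  have hx0 := PySem.Int.mod_nonneg ((j : Int) - i) hnpos
  split_ifs <;> omega

lemma cntF_nonneg (b pos : Int) (j : Nat) (n : Int) (hb : 0 ≤ b) (hn : 0 < n) :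
    0 ≤ cntF b pos j n := by
  unfold cntF
  have h1 : 0 ≤ PySem.Int.floordiv b n := by
    rw [PySem.Int.floordiv_eq_ediv_of_pos hn]; exact Int.ediv_nonneg hb (by omega)
  split <;> omega

-- sum is preserved by the redistribution step (each placed block adds 1)
lemma distribute_sum (bn : Nat) : ∀ (b pos : Int) (c : List Int), b.toNat = bn → 0 ≤ b →
    0 ≤ pos → pos < (c.length : Int) →
    (distribute_loop c pos b).sum = c.sum + b := by
  induction bn with
  | zero =>
    intro b pos c hbn hb hp hp2
    have hb0 : b = 0 := by omega
    subst hb0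
    rw [distribute_loop, if_neg (by omega), add_zero]
  | succ k ih =>
    intro b pos c hbn hb hp hp2
    rw [distribute_loop, if_pos (show b > 0 by omega)]
    have hplt : pos.toNat < c.length := by omega
    set c' := c.set pos.toNat (PySem.List.pyGetD c pos 0 + 1) with hc'
    have hlen' : c'.length = c.length := by simp [hc']
    rw [ih (b - 1) _ c' (by omega) (by omega) (by split <;> omega)
      (by rw [hlen']; split <;> omega)]
    have hsum : c'.sum = c.sum + 1 := by
      rw [hc', List.sum_set', dif_pos hplt,
        PySem.List.pyGetD_eq_getElem c 0 hp hp2]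
      ring
    rw [hsum]
    ring

-- the redistribution step preserves the invariant (nonempty, and nonneg or positive sum)
lemma stepA_inv (xl : List Int) (hc : xl ≠ [])
    (hP : (∀ x ∈ xl, 0 ≤ x) ∨ 0 < xl.sum) :
    (distribute_loop (xl.set (find_first_max_bank xl).toNat 0)
        (if find_first_max_bank xl
            = (((xl.set (find_first_max_bank xl).toNat 0).length : Int) - 1)
         then 0 else find_first_max_bank xl + 1)
        (PySem.List.pyGetD xl (find_first_max_bank xl) 0)) ≠ [] ∧
    ((∀ y ∈ (distribute_loop (xl.set (find_first_max_bank xl).toNat 0)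
        (if find_first_max_bank xl
            = (((xl.set (find_first_max_bank xl).toNat 0).length : Int) - 1)
         then 0 else find_first_max_bank xl + 1)
        (PySem.List.pyGetD xl (find_first_max_bank xl) 0)), 0 ≤ y) ∨
     0 < (distribute_loop (xl.set (find_first_max_bank xl).toNat 0)
        (if find_first_max_bank xl
            = (((xl.set (find_first_max_bank xl).toNat 0).length : Int) - 1)
         then 0 else find_first_max_bank xl + 1)
        (PySem.List.pyGetD xl (find_first_max_bank xl) 0)).sum) := by
  obtain ⟨hi0, hi1⟩ := find_first_range xl hc hP
  have hnpos : (0:Int) < (xl.length : Int) := by omega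
  have hb0 : 0 ≤ PySem.List.pyGetD xl (find_first_max_bank xl) 0 := by
    rw [blocks_eq xl hc hP]
    exact m_nonneg xl hc hP
  constructor
  · intro hnil
    have h1 := stepA_eq xl hc hP
    rw [hnil] at h1
    have h2 := congrArg List.length h1
    simp at h2
    exact hc (List.eq_nil_of_length_eq_zero h2.symm)
  · cases hP with
    | inl hnn =>
      left
      rw [stepA_eq xl hc (Or.inl hnn)]
      intro y hy
      rw [List.mem_iff_getElem] at hy
      obtain ⟨j, hjlt, rfl⟩ := hy
      rw [List.getElem_mapIdx]
      have hset : 0 ≤ (xl.set (find_first_max_bank xl).toNat 0)[j]'(by simpa using hjlt) := by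
        rw [List.getElem_set]
        split
        · omega
        · exact hnn _ (List.getElem_mem _)
      have := cntF_nonneg (PySem.List.pyGetD xl (find_first_max_bank xl) 0)
        (if find_first_max_bank xl = ((xl.length : Int) - 1) then 0
         else find_first_max_bank xl + 1) j (xl.length : Int) hb0 hnpos
      omega
    | inr hsum =>
      right
      have hlen1 : ((xl.set (find_first_max_bank xl).toNat 0).length : Int) = (xl.length : Int) := by
        simp
      rw [distribute_sum (PySem.List.pyGetD xl (find_first_max_bank xl) 0).toNat _ _ _ rfl hb0
        (by rw [hlen1]; split <;> omega) (by rw [hlen1]; split <;> omega)]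
      have hset : (xl.set (find_first_max_bank xl).toNat 0).sum
          = xl.sum + (-(xl[(find_first_max_bank xl).toNat]'(by omega)) + 0) := by
        rw [List.sum_set', dif_pos (by omega)]
      have hgm : xl[(find_first_max_bank xl).toNat]'(by omega)
          = PySem.List.pyGetD xl (find_first_max_bank xl) 0 :=
        (PySem.List.pyGetD_eq_getElem xl 0 hi0 hi1).symm
      rw [hset, hgm]
      omega

lemma branch_eq (f : Nat)
    (ihf : ∀ (seen : List (List Int)) (xl : List Int) (r : Int),
      xl ≠ [] → ((∀ x ∈ xl, 0 ≤ x) ∨ 0 < xl.sum) →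
      redistribute_loop f seen xl r = redistribute_alt_loop f seen xl r)
    (seen : List (List Int)) (c2 : List Int) (r : Int) (hne : c2 ≠ [])
    (hP : (∀ x ∈ c2, 0 ≤ x) ∨ 0 < c2.sum) :
    (if c2 ∈ seen then r + 1 else redistribute_loop f (seen ++ [c2]) c2 (r + 1))
      = (if c2 ∈ seen then r + 1 else redistribute_alt_loop f (PySem.Set.add seen c2) c2 (r + 1)) := by
  split
  · rfl
  · next hnm => rw [PySem.Set.add_of_not_mem hnm]; exact ihf _ _ _ hne hP

lemma loop_eq (fuel : Nat) : ∀ (seen : List (List Int)) (xl : List Int) (r : Int),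
    xl ≠ [] → ((∀ x ∈ xl, 0 ≤ x) ∨ 0 < xl.sum) →
    redistribute_loop fuel seen xl r = redistribute_alt_loop fuel seen xl r := by
  induction fuel with
  | zero => intro seen xl r hc hP; rfl
  | succ f ih =>
    intro seen xl r hc hP
    have hstep := c2_eq xl hc hP
    have hinv := stepA_inv xl hc hP
    rw [redistribute_loop, redistribute_alt_loop]
    simp only []
    rw [hstep]
    exact branch_eq f ih seen _ r hinv.1 hinv.2

-- ===== VERDICT (by name: the statement is the Claim_ definition above) =====
theorem redistribute_blocks_spec : Claim_equal_redistribute_blocks := by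
  intro sc _ hpre
  show redistribute_blocks sc = redistribute_blocks_alt sc
  unfold redistribute_blocks redistribute_blocks_alt
  rw [loop_eq _ _ _ _ hpre.1 hpre.2]
  rfl
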